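-- pv_equiv track=rewrite | github.com/tochev/yatib | yatib.py | split_utf8_at_space
-- ===== SOURCE A (Python) =====
-- def split_utf8_at_space(message, chunk_size):
--     """Splits message at chunks not exceeding chunk_size.
--
--     :param message: utf-8 encoded bytes
--     :param chunk_size: size of the chunks
--     :yields: chunks of the appropriate size
--     """
--     while message:
--         if len(message) <= chunk_size:
--             yield message
--             break
--         else:
--             for n in range(chunk_size, 0, -1):
--
--                 if message[n] in [' ', '\t'] and \
--                    (n-1 < 0 or ord(message[n-1]) < 128):
--                     yield message[:n]
--                     message = message[n:]
--                     break
--             else: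
--                 yield message[:chunk_size]
--                 message = message[chunk_size:]
-- ===== SOURCE B (Python) =====
-- import bisect
--
-- def split_utf8_at_space(message, chunk_size):
--     """Splits message at chunks not exceeding chunk_size.
--
--     Precomputes all break positions once, then places each cut with a
--     binary search instead of a per-chunk backward scan.
--     """
--     breaks = [p for p in range(1, len(message))
--               if message[p] in (' ', '\t') and ord(message[p - 1]) < 128]
--     n = len(message)
--     start = 0
--     while start < n:
--         if n - start <= chunk_size:
--             yield message[start:]
--             break
--         i = bisect.bisect_right(breaks, start + chunk_size)
--         if i > 0 and breaks[i - 1] > start: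
--             p = breaks[i - 1]
--         else:
--             p = start + chunk_size
--         yield message[start:p]
--         start = p
-- ===== Notes on version B (the rewrite author's own statement) =====
-- stated objective: alternative
-- what changed: A rescans backwards over the current chunk window for every chunk; B precomputes the sorted list of all break positions in one forward pass and then places each cut with a binary search (bisect_right) over that list, advancing a cursor instead of re-slicing the message.
import Mathlib
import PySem

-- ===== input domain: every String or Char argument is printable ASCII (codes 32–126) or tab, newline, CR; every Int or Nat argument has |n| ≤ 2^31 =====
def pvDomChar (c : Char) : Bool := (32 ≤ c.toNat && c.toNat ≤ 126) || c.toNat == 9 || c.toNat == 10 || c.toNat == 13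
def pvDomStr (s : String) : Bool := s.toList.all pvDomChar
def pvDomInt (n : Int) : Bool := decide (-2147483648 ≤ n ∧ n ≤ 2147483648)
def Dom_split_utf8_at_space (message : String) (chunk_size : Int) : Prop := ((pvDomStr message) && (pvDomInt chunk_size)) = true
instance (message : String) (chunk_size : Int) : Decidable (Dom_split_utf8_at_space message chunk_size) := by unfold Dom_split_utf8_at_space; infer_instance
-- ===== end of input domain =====

-- B replaces A's per-chunk backward scan by one precomputed sorted list of break
-- positions plus a binary search per chunk (objective: alternative algorithm).
-- Both Pythons are generators; the equivalence is about the yielded sequence.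

-- ===== PORT A =====
-- the body of A's inner `if`: message[n] in [' ','\t'] and (n-1 < 0 or ord(message[n-1]) < 128)
def pvACond (msg : List Char) (n : Int) : Bool :=
  (match PySem.List.pyGet? msg n with
   | some c => c == ' ' || c == '\t'
   | none => false)
  && (decide (n - 1 < 0) ||
      (match PySem.List.pyGet? msg (n - 1) with
       | some c => decide (c.toNat < 128)
       | none => false))

-- A's while-loop; fuel (= initial length + 1) only makes the recursion total:
-- inside Pre_ the message shrinks by at least one char per iteration.
def pvALoop (cs : Int) : Nat → List Char → List (List Char)
  | 0, _ => []
  | fuel+1, msg =>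
    if msg = [] then []
    else if (msg.length : Int) ≤ cs then [msg]
    else
      match (PySem.List.pyRange cs 0 (-1)).find? (pvACond msg) with
      | some n =>
          PySem.List.slice msg none (some n) ::
            pvALoop cs fuel (PySem.List.slice msg (some n) none)
      | none =>
          PySem.List.slice msg none (some cs) ::
            pvALoop cs fuel (PySem.List.slice msg (some cs) none)

def split_utf8_at_space (message : String) (chunk_size : Int) : List String :=
  (pvALoop chunk_size (message.toList.length + 1) message.toList).map String.ofList

-- ===== PORT B =====
-- the comprehension condition: message[p] in (' ', '\t') and ord(message[p-1]) < 128
def pvBreakAt (msg : List Char) (p : Int) : Bool :=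
  (match PySem.List.pyGet? msg p with
   | some c => c == ' ' || c == '\t'
   | none => false)
  && (match PySem.List.pyGet? msg (p - 1) with
      | some c => decide (c.toNat < 128)
      | none => false)

-- breaks = [p for p in range(1, len(message)) if ...]
def pvBreaks (msg : List Char) : List Int :=
  (PySem.List.pyRange 1 (msg.length : Int) 1).filter (pvBreakAt msg)

-- i = bisect.bisect_right(breaks, start + chunk_size); p = breaks[i-1] if ... else start + chunk_size
def pvBStep (breaks : List Int) (start cs : Int) : Int :=
  let i := PySem.List.bisectRight breaks (start + cs)
  if 0 < i ∧ start < PySem.List.pyGetD breaks ((i : Int) - 1) 0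
  then PySem.List.pyGetD breaks ((i : Int) - 1) 0
  else start + cs

-- B's while-loop over the cursor `start`; fuel is a totality guard as in A.
def pvBLoop (msg : List Char) (breaks : List Int) (cs : Int) : Nat → Int → List (List Char)
  | 0, _ => []
  | fuel+1, start =>
    if start < (msg.length : Int) then
      if (msg.length : Int) - start ≤ cs then [PySem.List.slice msg (some start) none]
      else
        let p := pvBStep breaks start cs
        PySem.List.slice msg (some start) (some p) :: pvBLoop msg breaks cs fuel p
    else []

def split_utf8_at_space_alt (message : String) (chunk_size : Int) : List String :=
  (pvBLoop message.toList (pvBreaks message.toList) chunk_size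
      (message.toList.length + 1) 0).map String.ofList

-- ===== PRECONDITION & SPEC =====
-- Pre_ excludes non-positive chunk_size with a non-empty message: there the Python A
-- (and B) loops forever, yielding no further progress, i.e. A does not return.
def Pre_split_utf8_at_space (message : String) (chunk_size : Int) : Prop :=
  message = "" ∨ 1 ≤ chunk_size
instance (message : String) (chunk_size : Int) : Decidable (Pre_split_utf8_at_space message chunk_size) := by unfold Pre_split_utf8_at_space; infer_instance

def pvWitness_split_utf8_at_space : String × Int := ("hello wide world", 7)

def Spec_split_utf8_at_space (message : String) (chunk_size : Int) (out : List String) : Prop := out = split_utf8_at_space_alt message chunk_size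
instance (message : String) (chunk_size : Int) (out : List String) : Decidable (Spec_split_utf8_at_space message chunk_size out) := by unfold Spec_split_utf8_at_space; infer_instance

-- ===== CLAIM (what is proved, stated in full; the proofs are below) =====
def Claim_equal_split_utf8_at_space : Prop := ∀ (message : String) (chunk_size : Int), Dom_split_utf8_at_space message chunk_size → Pre_split_utf8_at_space message chunk_size → Spec_split_utf8_at_space message chunk_size (split_utf8_at_space message chunk_size)

-- ===== LEMMAS AND PROOFS =====

-- find? on a countdown range, missing case
lemma pvFindDesc_none (p : Int → Bool) (a : Int)
    (h : ∀ m : Int, 1 ≤ m → m ≤ a → p m = false) :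
    (PySem.List.pyRange a 0 (-1)).find? p = none := by
  rw [List.find?_eq_none]
  intro x hx
  rw [PySem.List.mem_pyRange_neg_one] at hx
  simp [h x (by omega) hx.2]

-- find? on a countdown range finds the LARGEST index satisfying p
lemma pvFindDesc_some (p : Int → Bool) (a n : Int) (h1 : 1 ≤ n) (h2 : n ≤ a)
    (hp : p n = true) (hmax : ∀ m : Int, n < m → m ≤ a → p m = false) :
    (PySem.List.pyRange a 0 (-1)).find? p = some n := by
  obtain ⟨k, hk⟩ : ∃ k : Nat, a = (k : Int) := ⟨a.toNat, by omega⟩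
  subst hk
  induction k with
  | zero => omega
  | succ k ih =>
    rw [PySem.List.pyRange_neg_one_cons (by push_cast; omega)]
    by_cases hn : n = ((k + 1 : Nat) : Int)
    · subst hn
      rw [List.find?_cons_of_pos hp]
    · rw [List.find?_cons_of_neg (by
        have h := hmax ((k : Int) + 1) (by push_cast at h2 hn ⊢; omega) (by push_cast; omega)
        simp [h])]
      have : ((k + 1 : Nat) : Int) - 1 = (k : Int) := by push_cast; omega
      rw [this]
      exact ih (by push_cast at h2 hn ⊢; omega) (fun m hm1 hm2 => hmax m hm1 (by push_cast at hm2 ⊢; omega))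

-- the two break conditions coincide on corresponding positions
lemma pvCond_eq (msg : List Char) (s : Nat) (n : Int) (h1 : 1 ≤ n)
    (h2 : (s : Int) + n < msg.length) :
    pvACond (msg.drop s) n = pvBreakAt msg ((s : Int) + n) := by
  obtain ⟨m, rfl⟩ : ∃ m : Nat, n = ((m + 1 : Nat) : Int) := ⟨(n - 1).toNat, by omega⟩
  unfold pvACond pvBreakAt
  have e1 : ((s : Int) + ((m + 1 : Nat) : Int)) = ((s + m + 1 : Nat) : Int) := by push_cast; omega
  have e2 : (((m + 1 : Nat) : Int)) - 1 = ((m : Nat) : Int) := by push_cast; omega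
  have e3 : (((s + m + 1 : Nat) : Int)) - 1 = ((s + m : Nat) : Int) := by push_cast; omega
  rw [e1, e2, e3, PySem.List.pyGet?_natCast, PySem.List.pyGet?_natCast,
      PySem.List.pyGet?_natCast, PySem.List.pyGet?_natCast]
  have d1 : (msg.drop s)[m + 1]? = msg[s + m + 1]? := by
    rw [List.getElem?_drop, Nat.add_assoc]
  have d2 : (msg.drop s)[m]? = msg[s + m]? := by
    rw [List.getElem?_drop]
  rw [d1, d2]
  have hm : (decide ((m : Int) < 0)) = false := by simp
  rw [hm, Bool.false_or]

-- membership in the precomputed break list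
lemma pvMem_breaks (msg : List Char) (x : Int) :
    x ∈ pvBreaks msg ↔ (1 ≤ x ∧ x < msg.length) ∧ pvBreakAt msg x = true := by
  unfold pvBreaks
  rw [List.mem_filter, PySem.List.mem_pyRange_one]

lemma pvBreaks_sorted (msg : List Char) : (pvBreaks msg).Pairwise (· < ·) := by
  exact (PySem.List.pairwise_lt_pyRange_one 1 (msg.length : Int)).filter _

-- the cut chosen by B's bisect step equals the cut A's backward scan chooses
lemma pvCut_eq (msg : List Char) (s : Nat) (cs : Int) (hcs : 1 ≤ cs)
    (hlen : (s : Int) + cs < msg.length) :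
    pvBStep (pvBreaks msg) (s : Int) cs
      = (s : Int) + (((PySem.List.pyRange cs 0 (-1)).find? (pvACond (msg.drop s))).getD cs)
    ∧ 1 ≤ ((PySem.List.pyRange cs 0 (-1)).find? (pvACond (msg.drop s))).getD cs
    ∧ ((PySem.List.pyRange cs 0 (-1)).find? (pvACond (msg.drop s))).getD cs ≤ cs := by
  set breaks := pvBreaks msg with hbreaks
  set x : Int := (s : Int) + cs with hx
  set i := PySem.List.bisectRight breaks x with hi
  have hsorted : breaks.Pairwise (· ≤ ·) := (pvBreaks_sorted msg).imp le_of_lt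
  obtain ⟨hile, hlo, hhi⟩ := PySem.List.bisectRight_spec breaks x hsorted
  have hmono : ∀ (j k : Nat) (hj : j < breaks.length) (hk : k < breaks.length),
      j ≤ k → breaks[j] ≤ breaks[k] := by
    intro j k hj hk hjk
    rcases Nat.lt_or_eq_of_le hjk with h | h
    · exact le_of_lt (List.pairwise_iff_getElem.mp (pvBreaks_sorted msg) j k hj hk h)
    · subst h; exact le_rfl
  -- an index for every break below the window top lies below i
  have hidx : ∀ (j : Nat) (hj : j < breaks.length), breaks[j] ≤ x → j < i := by
    intro j hj hle
    by_contra hge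
    exact absurd (hhi j hj (by omega)) (by omega)
  -- a true A-condition inside the window forces i > 0 and breaks[i-1] > position
  have hmem_of_cond : ∀ m : Int, 1 ≤ m → m ≤ cs → pvACond (msg.drop s) m = true →
      ((s : Int) + m) ∈ breaks := by
    intro m hm1 hm2 hc
    rw [pvCond_eq msg s m hm1 (by omega)] at hc
    exact (pvMem_breaks msg _).2 ⟨⟨by omega, by omega⟩, hc⟩
  by_cases hc : 0 < i ∧ (s : Int) < PySem.List.pyGetD breaks ((i : Int) - 1) 0
  · -- B takes the recorded break b = breaks[i-1]
    have hi1 : i - 1 < breaks.length := by omega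
    have hgetD : PySem.List.pyGetD breaks ((i : Int) - 1) 0 = breaks[i - 1] := by
      have : ((i : Int) - 1) = ((i - 1 : Nat) : Int) := by omega
      rw [this, PySem.List.pyGetD_natCast, List.getD_eq_getElem?_getD,
          List.getElem?_eq_getElem hi1, Option.getD_some]
    set b := breaks[i - 1] with hb
    have hbmem : b ∈ breaks := List.getElem_mem hi1
    obtain ⟨⟨hb1, hb2⟩, hbcond⟩ := (pvMem_breaks msg b).1 hbmem
    have hble : b ≤ x := hlo (i - 1) hi1 (by omega)
    have hbgt : (s : Int) < b := by rw [hgetD] at hc; exact hc.2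
    set n : Int := b - (s : Int) with hn
    have hn1 : 1 ≤ n := by omega
    have hn2 : n ≤ cs := by omega
    have hcond : pvACond (msg.drop s) n = true := by
      rw [pvCond_eq msg s n hn1 (by omega)]
      have : (s : Int) + n = b := by omega
      rw [this]; exact hbcond
    have hmax : ∀ m : Int, n < m → m ≤ cs → pvACond (msg.drop s) m = false := by
      intro m hm1 hm2
      by_contra hne
      have hm0 : 1 ≤ m := by omega
      have hmem := hmem_of_cond m hm0 hm2 (by
        cases h : pvACond (msg.drop s) m with
        | true => rfl
        | false => exact absurd h hne)
      obtain ⟨j, hj, hjv⟩ := List.mem_iff_getElem.1 hmem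
      have hji : j < i := hidx j hj (by omega)
      have := hmono j (i - 1) hj hi1 (by omega)
      omega
    rw [pvFindDesc_some _ cs n hn1 hn2 hcond hmax]
    simp only [Option.getD_some]
    unfold pvBStep
    rw [← hi, if_pos hc, hgetD]
    refine ⟨by omega, hn1, hn2⟩
  · -- no recorded break in the window: B advances by chunk_size
    have hnone : ∀ m : Int, 1 ≤ m → m ≤ cs → pvACond (msg.drop s) m = false := by
      intro m hm1 hm2
      by_contra hne
      have hmem := hmem_of_cond m hm1 hm2 (by
        cases h : pvACond (msg.drop s) m with
        | true => rfl
        | false => exact absurd h hne)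
      obtain ⟨j, hj, hjv⟩ := List.mem_iff_getElem.1 hmem
      have hji : j < i := hidx j hj (by omega)
      have hi1 : i - 1 < breaks.length := by omega
      have hgetD : PySem.List.pyGetD breaks ((i : Int) - 1) 0 = breaks[i - 1] := by
        have : ((i : Int) - 1) = ((i - 1 : Nat) : Int) := by omega
        rw [this, PySem.List.pyGetD_natCast, List.getD_eq_getElem?_getD,
            List.getElem?_eq_getElem hi1, Option.getD_some]
      have := hmono j (i - 1) hj hi1 (by omega)
      exact hc ⟨by omega, by rw [hgetD]; omega⟩
    rw [pvFindDesc_none _ cs hnone]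
    simp only [Option.getD_none]
    unfold pvBStep
    rw [← hi, if_neg hc]
    refine ⟨rfl, by omega, le_rfl⟩

-- the two loops agree, chunk by chunk
lemma pvLoop_eq (msg : List Char) (cs : Int) (hcs : 1 ≤ cs) :
    ∀ (fuel : Nat) (s : Nat), s ≤ msg.length →
    pvALoop cs fuel (msg.drop s) = pvBLoop msg (pvBreaks msg) cs fuel (s : Int) := by
  intro fuel
  induction fuel with
  | zero => intro s _; rfl
  | succ fuel ih =>
    intro s hs
    by_cases hend : s = msg.length
    · subst hend
      simp [pvALoop, pvBLoop, List.drop_length]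
    · have hslt : s < msg.length := lt_of_le_of_ne hs hend
      have hne : msg.drop s ≠ [] := by
        rw [Ne, List.drop_eq_nil_iff]; omega
      have hlen : (msg.drop s).length = msg.length - s := List.length_drop
      rw [pvALoop, pvBLoop, if_neg hne,
          if_pos (show ((s : Nat) : Int) < (msg.length : Int) by exact_mod_cast hslt)]
      by_cases hfit : (msg.length : Int) - (s : Int) ≤ cs
      · rw [if_pos (show ((msg.drop s).length : Int) ≤ cs by rw [hlen]; omega),
            if_pos hfit, PySem.List.slice_from_natCast]
      · rw [if_neg (show ¬ ((msg.drop s).length : Int) ≤ cs by rw [hlen]; omega),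
            if_neg hfit]
        have hwin : (s : Int) + cs < msg.length := by omega
        obtain ⟨hstep, hv1, hv2⟩ := pvCut_eq msg s cs hcs hwin
        set F := (PySem.List.pyRange cs 0 (-1)).find? (pvACond (msg.drop s)) with hF
        have key : ∀ v : Int, F.getD cs = v →
            (PySem.List.slice (msg.drop s) none (some v) ::
              pvALoop cs fuel (PySem.List.slice (msg.drop s) (some v) none))
            = PySem.List.slice msg (some (s : Int)) (some (pvBStep (pvBreaks msg) (s : Int) cs)) ::
              pvBLoop msg (pvBreaks msg) cs fuel (pvBStep (pvBreaks msg) (s : Int) cs) := by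
          intro v hveq
          rw [hveq] at hstep hv1 hv2
          have hv0 : (0 : Int) ≤ v := by omega
          congr 1
          · rw [hstep, PySem.List.slice_to _ hv0,
                PySem.List.slice_toNat msg (by omega) (by omega)]
            congr 1
            omega
          · rw [hstep, PySem.List.slice_from _ hv0]
            have hdd : (msg.drop s).drop v.toNat = msg.drop (s + v.toNat) := by
              rw [List.drop_drop]
            rw [hdd]
            have hcast : (s : Int) + v = ((s + v.toNat : Nat) : Int) := by push_cast; omega
            rw [hcast]
            exact ih (s + v.toNat) (by omega)
        cases hFv : F with
        | some n => exact key n (by rw [hFv]; rfl)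
        | none => exact key cs (by rw [hFv]; rfl)

-- ===== VERDICT (by name: the statement is the Claim_ definition above) =====
theorem split_utf8_at_space_spec : Claim_equal_split_utf8_at_space := by
  intro message cs _hdom hpre
  unfold Spec_split_utf8_at_space split_utf8_at_space split_utf8_at_space_alt
  rcases hpre with h | h
  · subst h
    simp [pvALoop, pvBLoop]
  · have := pvLoop_eq message.toList cs h (message.toList.length + 1) 0 (by omega)
    simpa using congrArg (List.map String.ofList) this
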